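-- pv_equiv track=rewrite | github.com/znm64/AOC_23 | 11/11.py | rowcheck
-- ===== SOURCE A (Python) =====
-- def rowcheck(lines):
--     moveover = False
--     for count, i in enumerate(lines):
--         if not moveover:
--             if not '#' in i:
--                 lines.insert(count, '*'*len(lines[0]))
--                 moveover = True
--         else:
--             moveover = False
--     return lines
-- ===== SOURCE B (Python) =====
-- def rowcheck(lines):
--     expanded = []
--     for row in lines:
--         if '#' not in row:
--             expanded.append('*' * len(lines[0]))
--         expanded.append(row)
--     lines[:] = expanded
--     return lines
-- ===== Notes on version B (the rewrite author's own statement) =====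
-- stated objective: faster
-- what changed: A inserts star rows into the list while iterating over it, using a moveover flag to skip the element shifted by each insertion; B makes one plain pass that appends a star row before each blank row into a new list and assigns it back in place, so no mid-iteration mutation, skip flag, or O(n) insert shifts.
import Mathlib
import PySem

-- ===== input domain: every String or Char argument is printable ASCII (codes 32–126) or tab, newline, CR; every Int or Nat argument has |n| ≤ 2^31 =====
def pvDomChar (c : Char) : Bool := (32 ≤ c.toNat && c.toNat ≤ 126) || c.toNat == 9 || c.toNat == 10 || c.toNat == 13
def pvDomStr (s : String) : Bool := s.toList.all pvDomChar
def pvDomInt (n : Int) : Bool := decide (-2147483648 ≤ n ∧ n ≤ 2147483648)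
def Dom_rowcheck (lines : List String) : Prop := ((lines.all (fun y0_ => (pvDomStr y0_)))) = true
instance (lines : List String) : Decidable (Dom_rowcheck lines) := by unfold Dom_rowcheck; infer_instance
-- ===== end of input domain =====

-- B builds the expanded list in one pass instead of A's live-iteration insert with a skip flag;
-- both Pythons mutate `lines` in place and return it — the equivalence proved here is about the return value.

-- ===== PORT A =====
-- A iterates over the list WHILE inserting into it ('for count, i in enumerate(lines)' over a
-- mutating list = index loop over the current list); the `moveover` flag skips the element that
-- was shifted right by an insertion.  `lines.headD ""` is lines[0]; the branch using it is only
-- reached when count < length, so the list is nonempty and the default is never taken.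
def rowcheckGo (lines : List String) (count : Nat) (moveover : Bool) : List String :=
  if h : count < lines.length then
    if hm : moveover = false then
      if PySem.Str.isIn "#" lines[count] = false then
        rowcheckGo
          (PySem.List.insert lines (count : Int)
            (String.ofList (List.replicate (lines.headD "").toList.length '*')))
          (count + 1) true
      else rowcheckGo lines (count + 1) false
    else rowcheckGo lines (count + 1) false
  else lines
termination_by 2 * (lines.length - count) + (if moveover then 0 else 1)
decreasing_by
  · simp [PySem.List.length_insert, hm]
  · simp [hm]; omega
  · have hmt : moveover = true := by revert hm; cases moveover <;> simp
    simp [hmt]; omega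

def rowcheck (lines : List String) : List String := rowcheckGo lines 0 false

-- ===== PORT B =====
def rowcheck_alt (lines : List String) : List String :=
  lines.foldl
    (fun expanded row =>
      (if PySem.Str.isIn "#" row = false
        then expanded ++ [String.ofList (List.replicate (lines.headD "").toList.length '*')]
        else expanded) ++ [row])
    []

-- ===== PRECONDITION & SPEC =====
def Spec_rowcheck (lines : List String) (out : List String) : Prop := out = rowcheck_alt lines
instance (lines : List String) (out : List String) : Decidable (Spec_rowcheck lines out) := by unfold Spec_rowcheck; infer_instance

-- ===== CLAIM (what is proved, stated in full; the proofs are below) =====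
def Claim_equal_rowcheck : Prop := ∀ (lines : List String), Dom_rowcheck lines → Spec_rowcheck lines (rowcheck lines)

-- ===== LEMMAS AND PROOFS =====

def pvStar (w : Nat) : String := String.ofList (List.replicate w '*')

def pvExpand (w : Nat) (rest : List String) : List String :=
  rest.flatMap (fun r => if PySem.Str.isIn "#" r = false then [pvStar w, r] else [r])

lemma alt_eq_expand (lines : List String) :
    rowcheck_alt lines = pvExpand ((lines.headD "").toList.length) lines := by
  unfold rowcheck_alt
  generalize (lines.headD "").toList.length = w
  suffices h : ∀ (l : List String) (acc : List String),
      l.foldl (fun expanded row =>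
        (if PySem.Str.isIn "#" row = false
          then expanded ++ [String.ofList (List.replicate w '*')] else expanded) ++ [row]) acc
      = acc ++ pvExpand w l by
    simpa using h lines []
  intro l
  induction l with
  | nil => intro acc; simp [pvExpand]
  | cons r l ih =>
      intro acc
      rw [List.foldl_cons, ih]
      by_cases hb : PySem.Chars.isIn ['#'] r.toList = false <;>
        simp [pvExpand, hb, pvStar, List.flatMap_cons]

lemma go_spec (w : Nat) : ∀ (rest pre : List String),
    (∀ h0, (pre ++ rest).head? = some h0 → h0.toList.length = w) →
    rowcheckGo (pre ++ rest) pre.length false = pre ++ pvExpand w rest := by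
  intro rest
  induction rest with
  | nil =>
      intro pre _
      rw [rowcheckGo]
      simp [pvExpand]
  | cons r rest ih =>
      intro pre hhead
      have hlt : pre.length < (pre ++ r :: rest).length := by simp
      have hget : (pre ++ r :: rest)[pre.length]'hlt = r := by
        rw [List.getElem_append_right (le_refl pre.length)]
        simp
      have hw : ((pre ++ r :: rest).headD "").toList.length = w := by
        cases hp : (pre ++ r :: rest).head? with
        | none => simp at hp
        | some h0 =>
            have := hhead h0 hp
            rw [List.headD_eq_head?_getD, hp]
            exact this
      have hstar : String.ofList (List.replicate ((pre ++ r :: rest).headD "").toList.length '*')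
          = pvStar w := by rw [hw]; rfl
      rw [rowcheckGo]
      rw [dif_pos hlt, dif_pos (rfl : (false : Bool) = false)]
      simp only [hget]
      by_cases hb : PySem.Str.isIn "#" r = false
      · rw [if_pos hb]
        have hb' : PySem.Chars.isIn ['#'] r.toList = false := by simpa using hb
        have hins : PySem.List.insert (pre ++ r :: rest) (pre.length : Int)
            (String.ofList (List.replicate ((pre ++ r :: rest).headD "").toList.length '*'))
            = pre ++ pvStar w :: r :: rest := by
          rw [hstar, PySem.List.insert_natCast _ _ _ (by simp), List.take_left, List.drop_left]
        rw [hins]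
        -- one more unfold: the moveover = true step just skips the shifted element
        rw [rowcheckGo]
        have hlt2 : pre.length + 1 < (pre ++ pvStar w :: r :: rest).length := by
          simp
        rw [dif_pos hlt2, dif_neg (by decide : ¬ (true = false))]
        have hre : pre ++ pvStar w :: r :: rest = (pre ++ [pvStar w, r]) ++ rest := by simp
        have hlen : pre.length + 1 + 1 = (pre ++ [pvStar w, r]).length := by simp
        rw [hre, hlen, ih (pre ++ [pvStar w, r]) ?_]
        · simp [pvExpand, hb', List.flatMap_cons]
        · intro h0 hh0
          cases pre with
          | nil =>
              simp at hh0
              rw [← hh0]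
              simp [pvStar]
          | cons p ps => exact hhead h0 (by simpa using hh0)
      · rw [if_neg hb]
        have hb' : ¬ PySem.Chars.isIn ['#'] r.toList = false := by simpa using hb
        have hre : pre ++ r :: rest = (pre ++ [r]) ++ rest := by simp
        have hlen : pre.length + 1 = (pre ++ [r]).length := by simp
        rw [hre, hlen, ih (pre ++ [r]) ?_]
        · simp [pvExpand, hb', List.flatMap_cons]
        · intro h0 hh0
          cases pre with
          | nil => exact hhead h0 (by simpa using hh0)
          | cons p ps => exact hhead h0 (by simpa using hh0)

-- ===== VERDICT (by name: the statement is the Claim_ definition above) =====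
theorem rowcheck_spec : Claim_equal_rowcheck := by
  intro lines _
  unfold Spec_rowcheck rowcheck
  rw [alt_eq_expand]
  have h := go_spec ((lines.headD "").toList.length) lines []
  simp only [List.nil_append, List.length_nil] at h
  apply h
  intro h0 hh0
  rw [List.headD_eq_head?_getD, hh0]
  rfl
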